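-- pv_equiv track=rewrite | github.com/OSB-codes/DL_drug_repurposing | model_library.py | _generate_hidden_sizes
-- ===== SOURCE A (Python) =====
-- def _generate_hidden_sizes(initial_size, num_layers, decreasing=True):
--     """Generate hidden layer sizes with an intermediate non-power-of-2 layer, then powers of 2"""
--     sizes = [initial_size]
--     # Find the largest power of 2 smaller than initial_size
--     largest_power_of_2 = 2 ** (initial_size.bit_length() - 1)
--     if largest_power_of_2 == initial_size:
--         largest_power_of_2 //= 2  # If it's already a power of 2, go one step lower
--     # Add the largest power of 2
--     sizes.append(largest_power_of_2)
--     # Progressively decrease in powers of 2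
--     size = largest_power_of_2 // 2
--     for _ in range(num_layers - 2):
--         sizes.append(size)
--         size = max(size // 2, 8)  # Ensure it doesn't go below 8
--     return sizes
-- ===== SOURCE B (Python) =====
-- def _generate_hidden_sizes(initial_size, num_layers, decreasing=True):
--     """Closed form: after [initial_size, lp, lp >> 1], tail element for index i
--     (i = 1 .. num_layers-3) is max(lp >> (i+1), 8) computed directly from the
--     index, with no running accumulator."""
--     lp = 1 << (initial_size.bit_length() - 1)
--     if lp == initial_size:
--         lp >>= 1
--     k = num_layers - 2
--     if k <= 0:
--         return [initial_size, lp]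
--     return [initial_size, lp, lp >> 1] + [max(lp >> (i + 1), 8) for i in range(1, k)]
-- ===== Notes on version B (the rewrite author's own statement) =====
-- stated objective: alternative
-- what changed: The tail is computed per-element by a closed form (element i is max(lp >> (i+1), 8), with the first tail element lp >> 1 unclamped) via a comprehension over indices, instead of A's step-by-step halving accumulator carried through the loop.
-- outside the precondition, e.g. on _generate_hidden_sizes(0, 5, True): A returns [0, 0.5, 0.0, 8, 8], B raises ValueError
import Mathlib
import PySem

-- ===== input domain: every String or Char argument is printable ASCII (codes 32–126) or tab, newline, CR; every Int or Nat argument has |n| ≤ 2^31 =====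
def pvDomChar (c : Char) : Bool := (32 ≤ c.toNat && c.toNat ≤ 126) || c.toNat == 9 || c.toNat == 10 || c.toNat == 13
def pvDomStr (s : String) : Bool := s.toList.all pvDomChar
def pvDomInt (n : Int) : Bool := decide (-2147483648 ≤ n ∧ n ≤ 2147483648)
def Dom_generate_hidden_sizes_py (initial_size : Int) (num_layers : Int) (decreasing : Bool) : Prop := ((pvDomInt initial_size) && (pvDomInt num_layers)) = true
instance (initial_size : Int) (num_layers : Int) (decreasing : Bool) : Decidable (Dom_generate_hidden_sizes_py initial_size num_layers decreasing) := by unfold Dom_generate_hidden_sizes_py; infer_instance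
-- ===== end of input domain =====

-- B computes each tail element by a closed form max(lp // 2^(i+1), 8) over an index range,
-- with no carried accumulator; return values proved identical for initial_size ≠ 0.

-- ===== PORT A =====
def generate_hidden_sizes_py (initial_size : Int) (num_layers : Int) (decreasing : Bool) : List Int :=
  let sizes : List Int := [initial_size]
  -- 2 ** (initial_size.bit_length() - 1) — exact for initial_size ≠ 0 (Pre_)
  let lp0 : Int := 2 ^ (PySem.Int.bitLength initial_size - 1)
  let lp : Int := if lp0 = initial_size then PySem.Int.floordiv lp0 2 else lp0
  let sizes := sizes ++ [lp]
  -- for _ in range(num_layers - 2): loop variable unused, so iterate (num_layers-2).toNat times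
  let res := (List.range (num_layers - 2).toNat).foldl
      (fun (st : List Int × Int) _ => (st.1 ++ [st.2], max (PySem.Int.floordiv st.2 2) 8))
      (sizes, PySem.Int.floordiv lp 2)
  res.1

-- ===== PORT B =====
-- Python's 1 << k / lp >> k on nonneg ints are core Lean's <<< / >>> (exact per PYSEM.md)
def generate_hidden_sizes_py_alt (initial_size : Int) (num_layers : Int) (decreasing : Bool) : List Int :=
  let lp0 : Int := (1 : Int) <<< (PySem.Int.bitLength initial_size - 1)
  let lp : Int := if lp0 = initial_size then lp0 >>> (1 : Nat) else lp0
  let k : Int := num_layers - 2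
  if k ≤ 0 then [initial_size, lp]
  else
    [initial_size, lp, lp >>> (1 : Nat)] ++
      (PySem.List.pyRange 1 k 1).map
        (fun i => max (lp >>> (i + 1).toNat) 8)

-- ===== PRECONDITION & SPEC =====
-- Pre_ excludes initial_size = 0, on which Python's 2 ** (bit_length - 1) is the float 0.5,
-- so both programs return lists containing floats rather than values of the declared type.
def Pre_generate_hidden_sizes_py (initial_size : Int) (num_layers : Int) (decreasing : Bool) : Prop := initial_size ≠ 0
instance (initial_size : Int) (num_layers : Int) (decreasing : Bool) : Decidable (Pre_generate_hidden_sizes_py initial_size num_layers decreasing) := by unfold Pre_generate_hidden_sizes_py; infer_instance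
def pvWitness_generate_hidden_sizes_py : Int × Int × Bool := (100, 5, true)

def Spec_generate_hidden_sizes_py (initial_size : Int) (num_layers : Int) (decreasing : Bool) (out : List Int) : Prop := out = generate_hidden_sizes_py_alt initial_size num_layers decreasing
instance (initial_size : Int) (num_layers : Int) (decreasing : Bool) (out : List Int) : Decidable (Spec_generate_hidden_sizes_py initial_size num_layers decreasing out) := by unfold Spec_generate_hidden_sizes_py; infer_instance

-- ===== CLAIM (what is proved, stated in full; the proofs are below) =====
def Claim_equal_generate_hidden_sizes_py : Prop := ∀ (initial_size : Int) (num_layers : Int) (decreasing : Bool), Dom_generate_hidden_sizes_py initial_size num_layers decreasing → Pre_generate_hidden_sizes_py initial_size num_layers decreasing → Spec_generate_hidden_sizes_py initial_size num_layers decreasing (generate_hidden_sizes_py initial_size num_layers decreasing)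

-- ===== LEMMAS AND PROOFS =====

-- A's loop step and a pure unfolding of A's fold
def hsStep (v : Int) : Int := max (PySem.Int.floordiv v 2) 8

def hsIter : Nat → Int → List Int
  | 0, _ => []
  | n + 1, v => v :: hsIter n (hsStep v)

lemma hs_fold_eq (l : List Nat) (acc : List Int) (v : Int) :
    (l.foldl (fun (st : List Int × Int) _ => (st.1 ++ [st.2], max (PySem.Int.floordiv st.2 2) 8)) (acc, v)).1
      = acc ++ hsIter l.length v := by
  induction l generalizing acc v with
  | nil => simp [hsIter]
  | cons x xs ih =>
      simp only [List.foldl_cons, List.length_cons, hsIter]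
      rw [ih]
      simp [hsStep]

lemma floordiv_floordiv (a : Int) (ha : 0 ≤ a) (m : Nat) :
    PySem.Int.floordiv (PySem.Int.floordiv a (2 ^ m)) 2 = PySem.Int.floordiv a (2 ^ (m + 1)) := by
  rw [PySem.Int.floordiv_eq_ediv_of_pos (by positivity),
      PySem.Int.floordiv_eq_ediv_of_pos (by norm_num),
      PySem.Int.floordiv_eq_ediv_of_pos (by positivity)]
  rw [Int.ediv_ediv_of_nonneg (by positivity)]
  ring_nf

lemma floordiv_mono_pow (a : Int) (ha : 0 ≤ a) (m : Nat) :
    PySem.Int.floordiv a (2 ^ (m + 1)) ≤ PySem.Int.floordiv a (2 ^ m) := by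
  rw [PySem.Int.floordiv_eq_ediv_of_pos (by positivity),
      PySem.Int.floordiv_eq_ediv_of_pos (by positivity)]
  rw [Int.le_ediv_iff_mul_le (by positivity)]
  calc a / 2 ^ (m + 1) * 2 ^ m ≤ a / 2 ^ (m + 1) * 2 ^ (m + 1) := by
        apply mul_le_mul_of_nonneg_left (by
          exact pow_le_pow_right₀ (by norm_num) (Nat.le_succ m))
          (Int.ediv_nonneg ha (by positivity))
    _ ≤ a := Int.ediv_mul_le _ (by positivity)

lemma hsStep_closed (lp : Int) (hlp : 0 ≤ lp) (m : Nat) :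
    hsStep (max (PySem.Int.floordiv lp (2 ^ m)) 8) = max (PySem.Int.floordiv lp (2 ^ (m + 1))) 8 := by
  unfold hsStep
  by_cases h : 8 ≤ PySem.Int.floordiv lp (2 ^ m)
  · rw [max_eq_left h, floordiv_floordiv lp hlp m]
  · push_neg at h
    rw [max_eq_right (le_of_lt h)]
    have h2 : PySem.Int.floordiv lp (2 ^ (m + 1)) ≤ 8 :=
      le_trans (floordiv_mono_pow lp hlp m) (le_of_lt h)
    have h8 : PySem.Int.floordiv (8 : Int) 2 = 4 := by decide
    omega

lemma hsIter_closed (lp : Int) (hlp : 0 ≤ lp) (j m : Nat) :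
    hsIter j (max (PySem.Int.floordiv lp (2 ^ m)) 8)
      = (List.range' m j).map (fun i => max (PySem.Int.floordiv lp (2 ^ i)) 8) := by
  induction j generalizing m with
  | zero => rfl
  | succ j ih =>
      simp only [hsIter, List.range'_succ, List.map_cons]
      rw [hsStep_closed lp hlp m, ih (m + 1)]

-- for nonneg n, Python's n >> m is floor division by 2^m
lemma shiftr_floordiv (n : Int) (h : 0 ≤ n) (m : Nat) : n >>> m = PySem.Int.floordiv n (2 ^ m) := by
  obtain ⟨a, rfl⟩ := Int.eq_ofNat_of_zero_le h
  rw [PySem.Int.floordiv_eq_ediv_of_pos (by positivity)]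
  have h1 : ((a : Int) >>> m) = ((a >>> m : Nat) : Int) := by
    simp [HShiftRight.hShiftRight, Int.shiftRight]
  rw [h1, Nat.shiftRight_eq_div_pow, Int.natCast_div]
  push_cast; norm_num

lemma shiftr_floordiv' (n : Int) (h : 0 ≤ n) (m : Nat) :
    n >>> (m : Int) = PySem.Int.floordiv n (2 ^ m) := by
  obtain ⟨a, rfl⟩ := Int.eq_ofNat_of_zero_le h
  rw [Int.shiftRight_natCast]
  exact shiftr_floordiv _ (by positivity) m

lemma one_shiftl (k : Nat) : ((1 : Int) <<< k) = 2 ^ k := by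
  have h1 : ((1 : Nat) : Int) <<< k = (((1 : Nat) <<< k : Nat) : Int) := by
    simp [HShiftLeft.hShiftLeft, Int.shiftLeft]
  simpa [Nat.one_shiftLeft] using h1

lemma maps_eq (lp : Int) (hlp : 0 ≤ lp) (K : Int) (hK : 0 < K) :
    (List.range' 2 (K.toNat - 1)).map (fun i => max (PySem.Int.floordiv lp (2 ^ i)) 8)
      = (PySem.List.pyRange 1 K 1).map (fun i => max (lp >>> (i + 1).toNat) 8) := by
  rw [PySem.List.pyRange_one, List.range'_eq_map_range, List.map_map, List.map_map]
  have hn : (K - 1).toNat = K.toNat - 1 := by omega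
  rw [hn]
  apply List.map_congr_left
  intro x hx
  simp only [Function.comp]
  rw [shiftr_floordiv' lp hlp]
  have h2 : ((1 : Int) + ↑x + 1).toNat = 2 + x := by omega
  rw [h2]

-- ===== VERDICT (by name: the statement is the Claim_ definition above) =====
theorem generate_hidden_sizes_py_spec : Claim_equal_generate_hidden_sizes_py := by
  intro initial_size num_layers decreasing _ _
  unfold Spec_generate_hidden_sizes_py generate_hidden_sizes_py generate_hidden_sizes_py_alt
  simp only [one_shiftl]
  set lp0 : Int := 2 ^ (PySem.Int.bitLength initial_size - 1) with hlp0
  have hifeq : (if lp0 = initial_size then lp0 >>> (1 : Nat) else lp0)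
      = (if lp0 = initial_size then PySem.Int.floordiv lp0 2 else lp0) := by
    rw [shiftr_floordiv lp0 (by positivity) 1]; norm_num
  rw [hifeq]
  set lp : Int := if lp0 = initial_size then PySem.Int.floordiv lp0 2 else lp0 with hlp
  have hsh1 : lp >>> (1 : Nat) = PySem.Int.floordiv lp 2 := by
    rw [shiftr_floordiv _ (by
      rw [hlp]; split
      · rw [PySem.Int.floordiv_eq_ediv_of_pos (by norm_num)]
        exact Int.ediv_nonneg (by positivity) (by norm_num)
      · positivity) 1]
    norm_num
  rw [hsh1]
  have hlpnn : 0 ≤ lp := by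
    rw [hlp]
    split
    · rw [PySem.Int.floordiv_eq_ediv_of_pos (by norm_num)]
      exact Int.ediv_nonneg (by positivity) (by norm_num)
    · positivity
  rw [hs_fold_eq]
  by_cases hk : num_layers - 2 ≤ 0
  · have h0 : (num_layers - 2).toNat = 0 := by omega
    simp [hk, h0, hsIter]
  · simp only [if_neg hk, List.length_range]
    push_neg at hk
    have hksucc : (num_layers - 2).toNat = ((num_layers - 2).toNat - 1) + 1 := by omega
    rw [hksucc]
    simp only [hsIter]
    have hstep1 : hsStep (PySem.Int.floordiv lp 2)
        = max (PySem.Int.floordiv lp (2 ^ 2)) 8 := by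
      have h1 : PySem.Int.floordiv lp 2 = PySem.Int.floordiv lp (2 ^ 1) := by norm_num
      unfold hsStep
      rw [h1, floordiv_floordiv lp hlpnn 1]
    rw [hstep1, hsIter_closed lp hlpnn _ 2,
        maps_eq lp hlpnn (num_layers - 2) hk]
    simp
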